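-- pv_equiv track=rewrite | github.com/iahmed20/CS410_FINALPROJ | src/preprocess_data_1.py | is_likely_english_title
-- ===== SOURCE A (Python) =====
-- def is_likely_english_title(title):
--     title = title.lower()
--     if title == "":
--         return False
--     # TODO: some english titles have non-ascii characters in them.
--     # if not title.isascii():
--     #     return False
--     # TODO: some titles may simply be talking about the language with "(language)"
--     languages = [
--         "hungarian", "french", "german", "finnish",
--         "dutch", "portuguese", "russian", "latin",
--         "spanish", "esperanto", "polish", "italian",
--         "tagalog", "czech"
--     ]
--     for lang in languages:
--         if f"({lang})" in title:
--             return False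
--     return True
-- ===== SOURCE B (Python) =====
-- LANGUAGE_SET = frozenset([
--     "hungarian", "french", "german", "finnish",
--     "dutch", "portuguese", "russian", "latin",
--     "spanish", "esperanto", "polish", "italian",
--     "tagalog", "czech"
-- ])
--
--
-- def is_likely_english_title(title):
--     title = title.lower()
--     if title == "":
--         return False
--     # One pass: collect the contents of every innermost parenthetical
--     # (text between a '(' and the next paren char, when that char is ')').
--     contents = []
--     buf = None  # chars seen since the most recent '(' with no paren in between
--     for ch in title:
--         if ch == '(':
--             buf = []
--         elif ch == ')':
--             if buf is not None:
--                 contents.append(''.join(buf))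
--             buf = None
--         elif buf is not None:
--             buf.append(ch)
--     return all(c not in LANGUAGE_SET for c in contents)
-- ===== Notes on version B (the rewrite author's own statement) =====
-- stated objective: alternative
-- what changed: Replaces 14 whole-string substring scans (one per language) with a single character pass that extracts every innermost parenthetical's contents and tests each against a frozenset of the 14 languages.
import Mathlib
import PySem

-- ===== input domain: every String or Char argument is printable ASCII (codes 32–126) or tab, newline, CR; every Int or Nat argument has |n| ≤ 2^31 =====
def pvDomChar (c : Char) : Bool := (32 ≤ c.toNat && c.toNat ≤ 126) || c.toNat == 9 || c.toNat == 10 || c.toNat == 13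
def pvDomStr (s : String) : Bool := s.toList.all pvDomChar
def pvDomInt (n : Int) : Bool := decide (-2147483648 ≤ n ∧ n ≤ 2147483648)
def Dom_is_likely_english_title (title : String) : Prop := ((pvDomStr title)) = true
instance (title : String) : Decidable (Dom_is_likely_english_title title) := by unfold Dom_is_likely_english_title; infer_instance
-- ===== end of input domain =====

-- B replaces A's 14 whole-string substring scans by one pass that extracts every
-- innermost parenthetical's contents and tests each against a set of the languages
-- (objective: alternative; same observable behaviour).

-- ===== PORT A =====
def pvLanguages : List String :=
  ["hungarian", "french", "german", "finnish",
   "dutch", "portuguese", "russian", "latin",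
   "spanish", "esperanto", "polish", "italian",
   "tagalog", "czech"]

-- the early-return 'for lang in languages' loop of A
def pvLoopA (t : String) : List String → Bool
  | [] => true
  | lg :: rest => if PySem.Str.isIn ("(" ++ lg ++ ")") t then false else pvLoopA t rest

def is_likely_english_title (title : String) : Bool :=
  let t := PySem.Str.lower title
  if t = "" then false
  else pvLoopA t pvLanguages

-- ===== PORT B =====
-- B's frozenset of the language names (as lists of chars)
def pvLangSet : PySem.Set (List Char) := PySem.Set.ofList (pvLanguages.map String.toList)

-- B's single pass: contents of every innermost parenthetical
-- (state = chars seen since the most recent '(' with no paren in between, if any)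
def pvExtract : List Char → Option (List Char) → List (List Char)
  | [], _ => []
  | c :: rest, st =>
    if c = '(' then pvExtract rest (some [])
    else if c = ')' then
      match st with
      | some buf => buf :: pvExtract rest none
      | none => pvExtract rest none
    else pvExtract rest (st.map (fun b => b ++ [c]))

def is_likely_english_title_alt (title : String) : Bool :=
  let t := PySem.Str.lower title
  if t = "" then false
  else (pvExtract t.toList none).all (fun c => !(PySem.Set.contains pvLangSet c))

-- ===== PRECONDITION & SPEC =====
def Spec_is_likely_english_title (title : String) (out : Bool) : Prop := out = is_likely_english_title_alt title
instance (title : String) (out : Bool) : Decidable (Spec_is_likely_english_title title out) := by unfold Spec_is_likely_english_title; infer_instance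

-- ===== CLAIM (what is proved, stated in full; the proofs are below) =====
def Claim_equal_is_likely_english_title : Prop := ∀ (title : String), Dom_is_likely_english_title title → Spec_is_likely_english_title title (is_likely_english_title title)

-- ===== LEMMAS AND PROOFS =====

-- a char list with no parenthesis characters
def pvNoParen (l : List Char) : Prop := ∀ c ∈ l, c ≠ '(' ∧ c ≠ ')'

-- A's loop is the conjunction of the 14 substring tests
theorem pvLoopA_eq_all (t : String) (ls : List String) :
    pvLoopA t ls = ls.all (fun lg => !(PySem.Str.isIn ("(" ++ lg ++ ")") t)) := by
  induction ls with
  | nil => rfl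
  | cons lg rest ih =>
    simp only [pvLoopA, List.all_cons, ih]
    cases hv : PySem.Str.isIn ("(" ++ lg ++ ")") t <;> simp

-- key invariant of B's scan: for a paren-free l, l is extracted iff "(l)" occurs;
-- with an open buffer, additionally iff the buffer completes to l before any paren.
theorem pvExtract_key (s : List Char) :
    ∀ l, pvNoParen l →
      (l ∈ pvExtract s none ↔ ('(' :: (l ++ [')'])) <:+: s) ∧
      (∀ buf, pvNoParen buf →
        (l ∈ pvExtract s (some buf) ↔
          ('(' :: (l ++ [')'])) <:+: s ∨
            ∃ u, l = buf ++ u ∧ pvNoParen u ∧ (u ++ [')']) <+: s)) := by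
  induction s with
  | nil =>
    intro l hl
    constructor
    · simp only [pvExtract, List.not_mem_nil, false_iff]
      intro h
      simpa using List.infix_nil.mp h
    · intro buf hbuf
      simp only [pvExtract, List.not_mem_nil, false_iff]
      rintro (h | ⟨u, -, -, hpre⟩)
      · simpa using List.infix_nil.mp h
      · simpa using List.prefix_nil.mp hpre
  | cons c rest ih =>
    intro l hl
    have ihn := (ih l hl).1
    have ihs := (ih l hl).2
    by_cases hc1 : c = '('
    · subst hc1
      -- on '(' the buffer (re)opens
      have base : l ∈ pvExtract rest (some []) ↔
          ('(' :: (l ++ [')'])) <:+: rest ∨ (l ++ [')']) <+: rest := by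
        rw [ihs [] (by intro c hc; simp at hc)]
        constructor
        · rintro (h | ⟨u, hu, -, hpre⟩)
          · exact Or.inl h
          · exact Or.inr (by simpa [hu] using hpre)
        · rintro (h | h)
          · exact Or.inl h
          · exact Or.inr ⟨l, by simp, hl, h⟩
      constructor
      · show l ∈ pvExtract rest (some []) ↔ _
        rw [base, List.infix_cons_iff, List.cons_prefix_cons]
        simp [or_comm]
      · intro buf hbuf
        show l ∈ pvExtract rest (some []) ↔ _
        rw [base, List.infix_cons_iff, List.cons_prefix_cons]
        constructor
        · rintro (h | h)
          · exact Or.inl (Or.inr h)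
          · exact Or.inl (Or.inl ⟨rfl, h⟩)
        · rintro ((⟨-, h⟩ | h) | ⟨u, hu, hnu, hpre⟩)
          · exact Or.inr h
          · exact Or.inl h
          · -- u ++ [')'] cannot start with '('
            exfalso
            match u, hnu, hpre with
            | [], _, hpre =>
              have := (List.cons_prefix_cons.mp hpre).1
              simp at this
            | x :: u', hnu, hpre =>
              have hx : x = '(' := (List.cons_prefix_cons.mp hpre).1
              exact (hnu x (by simp)).1 hx
    · by_cases hc2 : c = ')'
      · subst hc2
        constructor
        · show l ∈ pvExtract rest none ↔ _
          rw [ihn, List.infix_cons_iff, List.cons_prefix_cons]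
          simp
        · intro buf hbuf
          show l ∈ (buf :: pvExtract rest none) ↔ _
          rw [List.mem_cons, ihn, List.infix_cons_iff, List.cons_prefix_cons]
          constructor
          · rintro (rfl | h)
            · exact Or.inr ⟨[], by simp, by intro c hc; simp at hc, by simp⟩
            · exact Or.inl (Or.inr h)
          · rintro ((⟨h, -⟩ | h) | ⟨u, hu, hnu, hpre⟩)
            · simp at h
            · exact Or.inr h
            · match u, hnu, hpre with
              | [], _, _ => exact Or.inl (by simpa using hu)
              | x :: u', hnu, hpre =>
                exfalso
                have hx : x = ')' := (List.cons_prefix_cons.mp hpre).1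
                exact (hnu x (by simp)).2 hx
      · -- ordinary character
        have hred_none : pvExtract (c :: rest) none = pvExtract rest none := by
          simp [pvExtract, hc1, hc2]
        have hred_some : ∀ buf, pvExtract (c :: rest) (some buf) =
            pvExtract rest (some (buf ++ [c])) := by
          intro buf; simp [pvExtract, hc1, hc2]
        constructor
        · rw [hred_none, ihn, List.infix_cons_iff, List.cons_prefix_cons]
          simp [Ne.symm hc1]
        · intro buf hbuf
          have hbc : pvNoParen (buf ++ [c]) := by
            intro x hx
            rcases List.mem_append.1 hx with h | h
            · exact hbuf x h
            · simp at h; subst h; exact ⟨hc1, hc2⟩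
          rw [hred_some buf, ihs (buf ++ [c]) hbc, List.infix_cons_iff,
            List.cons_prefix_cons]
          constructor
          · rintro (h | ⟨u, hu, hnu, hpre⟩)
            · exact Or.inl (Or.inr h)
            · refine Or.inr ⟨c :: u, by simp [hu], ?_, ?_⟩
              · intro x hx
                rcases List.mem_cons.1 hx with rfl | h
                · exact ⟨hc1, hc2⟩
                · exact hnu x h
              · exact List.cons_prefix_cons.mpr ⟨rfl, hpre⟩
          · rintro ((⟨h, -⟩ | h) | ⟨u, hu, hnu, hpre⟩)
            · exact absurd h.symm hc1
            · exact Or.inl h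
            · match u, hnu, hpre with
              | [], _, hpre =>
                exact absurd (List.cons_prefix_cons.mp hpre).1.symm hc2
              | x :: u', hnu, hpre =>
                have hx : x = c := (List.cons_prefix_cons.mp hpre).1
                subst hx
                exact Or.inr ⟨u', by simpa using hu,
                  fun y hy => hnu y (by simp [hy]),
                  (List.cons_prefix_cons.mp hpre).2⟩

theorem pvExtract_mem_iff_infix (s l : List Char) (hl : pvNoParen l) :
    l ∈ pvExtract s none ↔ ('(' :: (l ++ [')'])) <:+: s :=
  (pvExtract_key s l hl).1

-- every language name is paren-free
theorem pvLanguages_noParen : ∀ lg ∈ pvLanguages, pvNoParen lg.toList := by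
  have h : ∀ m ∈ pvLanguages.map String.toList, ∀ c ∈ m, c ≠ '(' ∧ c ≠ ')' := by
    rw [show pvLanguages.map String.toList =
      [['h', 'u', 'n', 'g', 'a', 'r', 'i', 'a', 'n'],
       ['f', 'r', 'e', 'n', 'c', 'h'],
       ['g', 'e', 'r', 'm', 'a', 'n'],
       ['f', 'i', 'n', 'n', 'i', 's', 'h'],
       ['d', 'u', 't', 'c', 'h'],
       ['p', 'o', 'r', 't', 'u', 'g', 'u', 'e', 's', 'e'],
       ['r', 'u', 's', 's', 'i', 'a', 'n'],
       ['l', 'a', 't', 'i', 'n'],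
       ['s', 'p', 'a', 'n', 'i', 's', 'h'],
       ['e', 's', 'p', 'e', 'r', 'a', 'n', 't', 'o'],
       ['p', 'o', 'l', 'i', 's', 'h'],
       ['i', 't', 'a', 'l', 'i', 'a', 'n'],
       ['t', 'a', 'g', 'a', 'l', 'o', 'g'],
       ['c', 'z', 'e', 'c', 'h']] from rfl]
    simp
  intro lg hlg c hc
  exact h lg.toList (List.mem_map_of_mem hlg) c hc

-- the pattern "(" + lg + ")" as a char list
theorem pvPattern_toList (lg : String) :
    ("(" ++ lg ++ ")").toList = '(' :: (lg.toList ++ [')']) := by simp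

-- ===== VERDICT (by name: the statement is the Claim_ definition above) =====
theorem is_likely_english_title_spec : Claim_equal_is_likely_english_title := by
  intro title _
  unfold Spec_is_likely_english_title is_likely_english_title is_likely_english_title_alt
  set t := PySem.Str.lower title with ht
  by_cases h0 : t = ""
  · simp [h0]
  · simp only [if_neg h0]
    rw [pvLoopA_eq_all, Bool.eq_iff_iff]
    simp only [List.all_eq_true, Bool.not_eq_true', Bool.eq_false_iff, Ne,
      PySem.Str.isIn_iff_infix, PySem.Set.contains_iff]
    constructor
    · intro hA c hc hmem
      have hmem' : c ∈ pvLanguages.map String.toList :=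
        (PySem.Set.mem_ofList (pvLanguages.map String.toList) c).1 hmem
      rcases List.mem_map.1 hmem' with ⟨lg, hlg, rfl⟩
      apply hA lg hlg
      rw [pvPattern_toList]
      exact (pvExtract_mem_iff_infix _ _ (pvLanguages_noParen lg hlg)).1 hc
    · intro hB lg hlg hinf
      rw [pvPattern_toList] at hinf
      have hmem : lg.toList ∈ pvExtract t.toList none :=
        (pvExtract_mem_iff_infix _ _ (pvLanguages_noParen lg hlg)).2 hinf
      apply hB _ hmem
      exact (PySem.Set.mem_ofList (pvLanguages.map String.toList) lg.toList).2
        (List.mem_map_of_mem hlg)
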